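-- pv_equiv track=rewrite | github.com/DannyRH27/RektCode | Python/AACodingChallenge.py/countingClosedPaths.py | closedPaths
-- ===== SOURCE A (Python) =====
-- def closedPaths(number):
--   str_num = str(number)
--   closed = set([0,4,6,9])
--   closed_paths = 0
--   for str_digit in str_num:
--     digit = int(str_digit)
--     if digit in closed:
--       closed_paths += 1
--
--     if digit == 8:
--       closed_paths += 2
--
--   return closed_paths
-- ===== SOURCE B (Python) =====
-- def closedPaths(number):
--     weights = (1, 0, 0, 0, 1, 0, 1, 0, 2, 1)
--     total = 0
--     while True:
--         number, digit = divmod(number, 10)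
--         total += weights[digit]
--         if number == 0:
--             return total
-- ===== Notes on version B (the rewrite author's own statement) =====
-- stated objective: alternative
-- what changed: Replaces A's string conversion + per-character int() with two membership branches by a pure-arithmetic divmod loop over the digits, accumulating from a length-10 weight table.
import Mathlib
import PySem

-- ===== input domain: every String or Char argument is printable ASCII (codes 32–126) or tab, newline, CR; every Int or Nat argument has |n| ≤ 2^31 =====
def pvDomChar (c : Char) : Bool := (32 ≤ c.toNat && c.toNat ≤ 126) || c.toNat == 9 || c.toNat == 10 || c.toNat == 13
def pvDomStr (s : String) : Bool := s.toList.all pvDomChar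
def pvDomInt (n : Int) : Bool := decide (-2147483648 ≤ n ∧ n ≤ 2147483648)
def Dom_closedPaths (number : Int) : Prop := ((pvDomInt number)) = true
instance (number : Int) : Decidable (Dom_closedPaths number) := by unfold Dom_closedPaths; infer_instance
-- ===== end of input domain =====

-- B replaces A's string conversion and per-character int() with a pure-arithmetic divmod loop
-- over the digits, accumulating from a length-10 weight table (objective: alternative).


-- ===== PORT A =====
-- closed = set([0,4,6,9])
def pvClosedSet : PySem.Set Int := PySem.Set.ofList [0, 4, 6, 9]

-- loop body: digit = int(str_digit); two conditional increments
def pvStepA (acc : Int) (c : Char) : Int :=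
  let digit : Int := (PySem.Int.ofChars? [c]).getD 0  -- int(str_digit); none = ValueError, excluded by Pre_
  let acc1 : Int := if pvClosedSet.contains digit then acc + 1 else acc
  if digit = 8 then acc1 + 2 else acc1

def closedPaths (number : Int) : Int :=
  ((PySem.Int.toStr number).toList).foldl pvStepA 0

-- ===== PORT B =====
def pvWeights : List Int := [1, 0, 0, 0, 1, 0, 1, 0, 2, 1]

-- the `while True` loop; fuel only makes it total (unreachable under Pre_ with fuel = natAbs+1)
def pvLoopB : Nat → Int → Int → Int
  | 0, _, total => total
  | fuel + 1, n, total =>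
    let q := PySem.Int.floordiv n 10
    let d := PySem.Int.mod n 10
    let total' := total + PySem.List.pyGetD pvWeights d 0
    if q = 0 then total' else pvLoopB fuel q total'

def closedPaths_alt (number : Int) : Int :=
  pvLoopB (number.natAbs + 1) number 0

-- ===== PRECONDITION & SPEC =====
-- A raises ValueError on negative numbers (int('-') on the sign character); Pre_ excludes exactly those.
def Pre_closedPaths (number : Int) : Prop := 0 ≤ number
instance (number : Int) : Decidable (Pre_closedPaths number) := by unfold Pre_closedPaths; infer_instance
def pvWitness_closedPaths : Int := (8)

def Spec_closedPaths (number : Int) (out : Int) : Prop := out = closedPaths_alt number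
instance (number : Int) (out : Int) : Decidable (Spec_closedPaths number out) := by unfold Spec_closedPaths; infer_instance

-- ===== CLAIM (what is proved, stated in full; the proofs are below) =====
def Claim_equal_closedPaths : Prop := ∀ (number : Int), Dom_closedPaths number → Pre_closedPaths number → Spec_closedPaths number (closedPaths number)

-- ===== LEMMAS AND PROOFS =====

-- digit weight; both programs compute sums of this over the decimal digits
def pvW (m : Nat) : Int := pvWeights.getD m 0

-- total weight of the digit string of m (the common mathematical value)
def pvTot (m : Nat) : Int :=
  if h : m / 10 = 0 then pvW (m % 10) else pvTot (m / 10) + pvW (m % 10)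
  decreasing_by exact Nat.div_lt_self (by omega) (by omega)

lemma pvDigitVal (m : Nat) (hm : m < 10) :
    (PySem.Int.ofChars? [Nat.digitChar m]).getD 0 = (m : Int) := by
  interval_cases m <;> decide

lemma pvStepA_digitChar (acc : Int) (m : Nat) (hm : m < 10) :
    pvStepA acc (Nat.digitChar m) = acc + pvW m := by
  unfold pvStepA
  rw [pvDigitVal m hm]
  interval_cases m <;> simp [pvClosedSet, pvW, pvWeights]

lemma pvTot_base (n : Nat) (h0 : n / 10 = 0) : pvTot n = pvW (n % 10) := by
  rw [pvTot]; simp [h0]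

lemma pvTot_step (n : Nat) (h0 : n / 10 ≠ 0) : pvTot n = pvTot (n / 10) + pvW (n % 10) := by
  rw [pvTot]; simp [h0]

lemma foldA_core (f : Nat) : ∀ (n : Nat) (l : List Char) (acc : Int), n < f →
    (Nat.toDigitsCore 10 f n l).foldl pvStepA acc = l.foldl pvStepA (acc + pvTot n) := by
  induction f with
  | zero => intro n l acc h; omega
  | succ f ih =>
    intro n l acc h
    simp only [Nat.toDigitsCore]
    by_cases h0 : n / 10 = 0
    · simp only [h0, if_pos, List.foldl_cons]
      rw [pvStepA_digitChar acc (n % 10) (Nat.mod_lt _ (by omega)), pvTot_base n h0]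
    · rw [if_neg h0, ih (n / 10) _ acc (by omega)]
      simp only [List.foldl_cons]
      rw [pvStepA_digitChar (acc + pvTot (n / 10)) (n % 10) (Nat.mod_lt _ (by omega)),
        pvTot_step n h0, add_assoc]

lemma closedPaths_eq_tot (number : Int) (h : 0 ≤ number) :
    closedPaths number = pvTot number.toNat := by
  unfold closedPaths
  rw [PySem.Int.toList_toStr]
  unfold PySem.Int.toChars
  rw [if_neg (by omega)]
  unfold Nat.toDigits
  rw [foldA_core (number.toNat + 1) number.toNat [] 0 (by omega)]
  simp

lemma loopB_eq_tot (f : Nat) : ∀ (m : Nat) (total : Int), m < f →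
    pvLoopB f (m : Int) total = total + pvTot m := by
  induction f with
  | zero => intro m total h; omega
  | succ f ih =>
    intro m total h
    have hq : PySem.Int.floordiv (m : Int) 10 = ((m / 10 : Nat) : Int) := by
      exact_mod_cast PySem.Int.floordiv_natCast m 10
    have hd : PySem.Int.mod (m : Int) 10 = ((m % 10 : Nat) : Int) := by
      exact_mod_cast PySem.Int.mod_natCast m 10
    simp only [pvLoopB, hq, hd, PySem.List.pyGetD_natCast]
    by_cases h0 : m / 10 = 0
    · rw [if_pos (by exact_mod_cast h0), pvTot_base m h0]
      simp [pvW]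
    · rw [if_neg (by exact_mod_cast h0), ih (m / 10) _ (by omega), pvTot_step m h0]
      simp only [pvW, List.getD]
      ring

-- ===== VERDICT (by name: the statement is the Claim_ definition above) =====
theorem closedPaths_spec : Claim_equal_closedPaths := by
  intro number _ hpre
  unfold Spec_closedPaths closedPaths_alt
  rw [closedPaths_eq_tot number hpre]
  have hcast : (number.toNat : Int) = number := Int.toNat_of_nonneg hpre
  have hl := loopB_eq_tot (number.natAbs + 1) number.toNat 0 (by omega)
  rw [hcast] at hl
  rw [hl, zero_add]
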